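-- pv_equiv track=rewrite | github.com/kesepain-KE/kesepain-Agent | core/action.py | find_tool_for_search
-- ===== SOURCE A (Python) =====
-- def find_tool_by_directory_name(tools, query):
--     normalized_query = normalize_tool_token(query)
--     for tool in tools:
--         if normalize_tool_token(tool["name"]) == normalized_query:
--             return tool
--     return None
--
-- def normalize_tool_token(text):
--     normalized = text.strip().casefold()
--     while normalized.startswith("/"):
--         normalized = normalized[1:]
--     return normalized
--
-- def build_tool_aliases(tool):
--     command = tool["command"].strip()
--     aliases = {
--         tool["name"].strip(),
--         command,
--         command.lstrip("/"),
--         f"/{tool['name'].strip()}",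
--         tool["explain"].strip(),
--     }
--     return {normalize_tool_token(alias) for alias in aliases if alias.strip() != ""}
--
-- def find_tool_by_command(tools, command_name):
--     normalized_command = normalize_tool_token(command_name)
--     for tool in tools:
--         if normalized_command in build_tool_aliases(tool):
--             return tool
--     return None
--
-- def find_tool_for_search(tools, query):
--     tool = find_tool_by_directory_name(tools, query)
--     if tool is not None:
--         return tool
--     tool = find_tool_by_command(tools, query)
--     if tool is not None:
--         return tool
--
--     normalized_query = normalize_tool_token(query)
--     if normalized_query == "":
--         return None
--
--     for tool in tools:
--         search_texts = [
--             tool["name"],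
--             tool["command"],
--             tool["command"].lstrip("/"),
--             tool["explain"],
--         ]
--         for text in search_texts:
--             if normalized_query in normalize_tool_token(text):
--                 return tool
--     return None
-- ===== SOURCE B (Python) =====
-- def normalize_tool_token(text):
--     normalized = text.strip().casefold()
--     while normalized.startswith("/"):
--         normalized = normalized[1:]
--     return normalized
--
--
-- def build_tool_aliases(tool):
--     command = tool["command"].strip()
--     aliases = {
--         tool["name"].strip(),
--         command,
--         command.lstrip("/"),
--         f"/{tool['name'].strip()}",
--         tool["explain"].strip(),
--     }
--     return {normalize_tool_token(alias) for alias in aliases if alias.strip() != ""}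
--
--
-- def _match_rank(tool, normalized_query):
--     # rank 1: exact alias match; rank 2: substring match (skipped for the empty query); 3: none
--     if normalized_query in build_tool_aliases(tool):
--         return 1
--     if normalized_query != "" and any(
--         normalized_query in normalize_tool_token(text)
--         for text in (
--             tool["name"],
--             tool["command"],
--             tool["command"].lstrip("/"),
--             tool["explain"],
--         )
--     ):
--         return 2
--     return 3
--
--
-- def find_tool_for_search(tools, query):
--     normalized_query = normalize_tool_token(query)
--     for tool in tools:
--         if normalize_tool_token(tool["name"]) == normalized_query:
--             return tool
--     best = None
--     best_rank = 3
--     for tool in tools: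
--         rank = _match_rank(tool, normalized_query)
--         if rank < best_rank:
--             best, best_rank = tool, rank
--             if rank == 1:  # best possible rank in this pass: stop scanning
--                 break
--     return best
-- ===== Notes on version B (the rewrite author's own statement) =====
-- stated objective: alternative
-- what changed: A's second and third full scans (by-alias, then by-substring) are collapsed into one scored pass that ranks each tool (1 = alias, 2 = substring), keeps the earliest tool with the smallest rank and breaks early on rank 1; only the name scan remains a separate pass.
import Mathlib
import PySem

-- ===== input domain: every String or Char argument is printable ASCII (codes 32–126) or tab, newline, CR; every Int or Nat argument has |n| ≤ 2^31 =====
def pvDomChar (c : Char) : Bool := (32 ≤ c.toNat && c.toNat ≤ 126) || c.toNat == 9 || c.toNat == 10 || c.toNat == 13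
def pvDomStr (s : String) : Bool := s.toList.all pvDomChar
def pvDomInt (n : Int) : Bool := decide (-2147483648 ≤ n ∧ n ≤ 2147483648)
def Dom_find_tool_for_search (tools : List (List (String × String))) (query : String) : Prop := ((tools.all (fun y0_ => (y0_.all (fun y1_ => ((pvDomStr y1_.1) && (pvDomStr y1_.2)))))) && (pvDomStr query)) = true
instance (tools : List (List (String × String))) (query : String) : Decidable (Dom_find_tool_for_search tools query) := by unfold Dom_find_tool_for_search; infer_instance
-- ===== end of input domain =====

-- B keeps A's first (name) scan but collapses A's second and third scans (by-alias, by-substring)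
-- into one scored pass that ranks each tool (1 = alias, 2 = substring), keeps the earliest tool
-- with the smallest rank and stops early on rank 1 (objective: alternative decomposition, same cost).


-- ===== PORT A =====
-- shared module-level helpers of both Pythons (Source B keeps them verbatim)

-- the 'while normalized.startswith("/"): normalized = normalized[1:]' loop of normalize_tool_token
def pvDropSlashes : List Char → List Char
  | [] => []
  | c :: cs => if c = '/' then pvDropSlashes cs else c :: cs

-- normalize_tool_token; .casefold() ported as lower, exact on the ASCII domain Dom_
def pvNormTok (s : List Char) : List Char :=
  pvDropSlashes (PySem.Chars.lower (PySem.Chars.strip s))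

-- s.lstrip("/")
def pvLstripSlash (s : List Char) : List Char := s.dropWhile (· == '/')

-- tool[k]; A (and B) only evaluate this where Pre_ guarantees the key is present — on the
-- excluded inputs Python raises KeyError, so the "" default is never observed inside Pre_
def pvGetS (t : List (String × String)) (k : String) : List Char :=
  ((PySem.Dict.mk t).getD k "").toList

-- build_tool_aliases
def pvBuildAliases (t : List (String × String)) : PySem.Set (List Char) :=
  let command := PySem.Chars.strip (pvGetS t "command")
  let aliases : PySem.Set (List Char) := PySem.Set.ofList
    [PySem.Chars.strip (pvGetS t "name"), command, pvLstripSlash command,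
     '/' :: PySem.Chars.strip (pvGetS t "name"), PySem.Chars.strip (pvGetS t "explain")]
  PySem.Set.ofList ((aliases.filter (fun al => !(PySem.Chars.strip al).isEmpty)).map pvNormTok)

def pvFindByDirName (tools : List (List (String × String))) (query : String) :
    Option (List (String × String)) :=
  let nq := pvNormTok query.toList
  tools.find? (fun t => pvNormTok (pvGetS t "name") == nq)

def pvFindByCommand (tools : List (List (String × String))) (command_name : String) :
    Option (List (String × String)) :=
  let nc := pvNormTok command_name.toList
  tools.find? (fun t => PySem.Set.contains (pvBuildAliases t) nc)

-- the search_texts list of A's third loop (also the texts tuple of B's rank 2)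
def pvTexts (t : List (String × String)) : List (List Char) :=
  [pvGetS t "name", pvGetS t "command", pvLstripSlash (pvGetS t "command"), pvGetS t "explain"]

def find_tool_for_search (tools : List (List (String × String))) (query : String) :
    Option (List (String × String)) :=
  match pvFindByDirName tools query with
  | some t => some t
  | none =>
    match pvFindByCommand tools query with
    | some t => some t
    | none =>
      let nq := pvNormTok query.toList
      if nq.isEmpty then none
      else tools.find? (fun t => (pvTexts t).any (fun text => PySem.Chars.isIn nq (pvNormTok text)))

-- ===== PORT B =====
-- _match_rank of Source B
def pvRank12 (t : List (String × String)) (nq : List Char) : Nat :=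
  if PySem.Set.contains (pvBuildAliases t) nq then 1
  else if !nq.isEmpty && (pvTexts t).any (fun text => PySem.Chars.isIn nq (pvNormTok text)) then 2
  else 3

-- Source B's second loop over (best, best_rank); the 'break' on rank 1 returns that tool at once
def pvScan12 (nq : List Char) :
    List (List (String × String)) → Option (List (String × String)) × Nat →
      Option (List (String × String))
  | [], acc => acc.1
  | t :: ts, acc =>
      let rank := pvRank12 t nq
      if rank < acc.2 then
        if rank == 1 then some t else pvScan12 nq ts (some t, rank)
      else pvScan12 nq ts acc

def find_tool_for_search_alt (tools : List (List (String × String))) (query : String) :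
    Option (List (String × String)) :=
  let nq := pvNormTok query.toList
  match tools.find? (fun t => pvNormTok (pvGetS t "name") == nq) with
  | some t => some t
  | none => pvScan12 nq tools ((none : Option (List (String × String))), 3)

-- ===== PRECONDITION & SPEC =====
-- non-recursive restatement of normalize_tool_token for the precondition (leading '/' removal
-- written as dropWhile, so Pre_ is a shape condition a reader checks without running the port's loop)
def pvNormTokPre (s : List Char) : List Char :=
  (PySem.Chars.lower (PySem.Chars.strip s)).dropWhile (· == '/')

-- the alias set of build_tool_aliases, restated with pvNormTokPre for the precondition
def pvBuildAliasesPre (t : List (String × String)) : PySem.Set (List Char) :=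
  let command := PySem.Chars.strip (pvGetS t "command")
  let aliases : PySem.Set (List Char) := PySem.Set.ofList
    [PySem.Chars.strip (pvGetS t "name"), command, pvLstripSlash command,
     '/' :: PySem.Chars.strip (pvGetS t "name"), PySem.Chars.strip (pvGetS t "explain")]
  PySem.Set.ofList ((aliases.filter (fun al => !(PySem.Chars.strip al).isEmpty)).map pvNormTokPre)

-- tool has key k
def pvHasK (t : List (String × String)) (k : String) : Prop :=
  ((PySem.Dict.mk t).get? k).isSome = true

-- Pre_ is exactly the set of inputs on which Python A returns normally: either the name scan
-- finds a match before reaching a tool without "name", or every tool has a non-matching "name"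
-- and the alias scan finds a match before reaching a tool without "command"/"explain" (or all
-- tools carry all three keys). Outside Pre_ A raises KeyError; nothing A returns on is excluded.
def Pre_find_tool_for_search (tools : List (List (String × String))) (query : String) : Prop :=
  (∃ i < tools.length,
      (pvHasK tools[i]! "name" ∧ pvNormTokPre (pvGetS tools[i]! "name") = pvNormTokPre query.toList)
      ∧ ∀ j < i, pvHasK tools[j]! "name")
  ∨ ((∀ t ∈ tools, pvHasK t "name" ∧ pvNormTokPre (pvGetS t "name") ≠ pvNormTokPre query.toList)
     ∧ ((∃ i < tools.length,
           (pvHasK tools[i]! "command" ∧ pvHasK tools[i]! "explain"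
             ∧ PySem.Set.contains (pvBuildAliasesPre tools[i]!) (pvNormTokPre query.toList) = true)
           ∧ ∀ j < i, pvHasK tools[j]! "command" ∧ pvHasK tools[j]! "explain")
        ∨ ∀ t ∈ tools, pvHasK t "command" ∧ pvHasK t "explain"))
instance (tools : List (List (String × String))) (query : String) : Decidable (Pre_find_tool_for_search tools query) := by unfold Pre_find_tool_for_search pvHasK; infer_instance

def pvWitness_find_tool_for_search : (List (List (String × String))) × String :=
  ([[("name", "a"), ("command", "/a"), ("explain", "run a")]], "a")

def Spec_find_tool_for_search (tools : List (List (String × String))) (query : String) (out : Option (List (String × String))) : Prop := out = find_tool_for_search_alt tools query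
instance (tools : List (List (String × String))) (query : String) (out : Option (List (String × String))) : Decidable (Spec_find_tool_for_search tools query out) := by unfold Spec_find_tool_for_search; infer_instance

-- ===== CLAIM (what is proved, stated in full; the proofs are below) =====
def Claim_equal_find_tool_for_search : Prop := ∀ (tools : List (List (String × String))) (query : String), Dom_find_tool_for_search tools query → Pre_find_tool_for_search tools query → Spec_find_tool_for_search tools query (find_tool_for_search tools query)

-- ===== LEMMAS AND PROOFS =====

theorem pv_find?_congr_mem {α : Type} (l : List α) (p q : α → Bool)
    (h : ∀ x ∈ l, p x = q x) : l.find? p = l.find? q := by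
  induction l with
  | nil => rfl
  | cons x xs ih =>
    simp only [List.find?]
    rw [h x (by simp)]
    cases q x
    · exact ih (fun y hy => h y (by simp [hy]))
    · rfl

-- the two tier predicates of B's scored pass
def pvP1 (nq : List Char) (t : List (String × String)) : Bool :=
  PySem.Set.contains (pvBuildAliases t) nq
def pvP2 (nq : List Char) (t : List (String × String)) : Bool :=
  !nq.isEmpty && (pvTexts t).any (fun text => PySem.Chars.isIn nq (pvNormTok text))

theorem pvRank12_cases (t : List (String × String)) (nq : List Char) :
    (pvP1 nq t = true ∧ pvRank12 t nq = 1)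
    ∨ (pvP1 nq t = false ∧ pvP2 nq t = true ∧ pvRank12 t nq = 2)
    ∨ (pvP1 nq t = false ∧ pvP2 nq t = false ∧ pvRank12 t nq = 3) := by
  unfold pvRank12 pvP1 pvP2
  split_ifs with h1 h2 <;> simp_all

-- once a rank-2 tool is held, the scan only looks for a rank-1 tool
theorem pvScan12_two (nq : List Char) (xs : List (List (String × String)))
    (b : List (String × String)) :
    pvScan12 nq xs (some b, 2) = (xs.find? (pvP1 nq)).orElse (fun _ => some b) := by
  induction xs with
  | nil => rfl
  | cons y ys ih =>
    rcases pvRank12_cases y nq with ⟨h1, hr⟩ | ⟨h1, _, hr⟩ | ⟨h1, _, hr⟩ <;>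
      simp [pvScan12, hr, List.find?, h1, ih, Option.orElse]

-- B's scored pass = the first alias match, else the first substring match
theorem pvScan12_three (nq : List Char) (xs : List (List (String × String))) :
    pvScan12 nq xs (none, 3)
      = (xs.find? (pvP1 nq)).orElse (fun _ => xs.find? (pvP2 nq)) := by
  induction xs with
  | nil => rfl
  | cons y ys ih =>
    rcases pvRank12_cases y nq with ⟨h1, hr⟩ | ⟨h1, h2, hr⟩ | ⟨h1, h2, hr⟩
    · simp [pvScan12, hr, List.find?, h1, Option.orElse]
    · simp only [pvScan12, hr, show (2 : Nat) < 3 by decide, if_true]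
      rw [pvScan12_two]
      simp [List.find?, h1, h2]
    · simp [pvScan12, hr, List.find?, h1, h2, ih]

-- ===== VERDICT (by name: the statement is the Claim_ definition above) =====
theorem find_tool_for_search_spec : Claim_equal_find_tool_for_search := by
  intro tools query _hdom _hpre
  unfold Spec_find_tool_for_search
  unfold find_tool_for_search find_tool_for_search_alt pvFindByDirName pvFindByCommand
  set nq := pvNormTok query.toList with hnq
  show (match tools.find? (fun t => pvNormTok (pvGetS t "name") == nq) with
    | some t => some t
    | none =>
      match tools.find? (fun t => PySem.Set.contains (pvBuildAliases t) nq) with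
      | some t => some t
      | none =>
        if nq.isEmpty then none
        else tools.find? (fun t => (pvTexts t).any fun text =>
              PySem.Chars.isIn nq (pvNormTok text)))
    = (match tools.find? (fun t => pvNormTok (pvGetS t "name") == nq) with
      | some t => some t
      | none => pvScan12 nq tools (none, 3))
  cases hf0 : tools.find? (fun t => pvNormTok (pvGetS t "name") == nq) with
  | some t => rfl
  | none =>
    show (match tools.find? (fun t => PySem.Set.contains (pvBuildAliases t) nq) with
      | some t => some t
      | none =>
        if nq.isEmpty then none
        else tools.find? (fun t => (pvTexts t).any fun text =>
              PySem.Chars.isIn nq (pvNormTok text)))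
      = pvScan12 nq tools (none, 3)
    rw [pvScan12_three]
    cases hf1 : tools.find? (fun t => PySem.Set.contains (pvBuildAliases t) nq) with
    | some t => rw [show tools.find? (pvP1 nq) = some t from hf1]; rfl
    | none =>
      rw [show tools.find? (pvP1 nq) = none from hf1]
      by_cases hq : nq.isEmpty
      · have : tools.find? (pvP2 nq) = none :=
          List.find?_eq_none.mpr (fun t _ => by simp [pvP2, hq])
        rw [if_pos hq, this]
        rfl
      · have hq' : nq.isEmpty = false := by simpa using hq
        rw [if_neg hq,
          pv_find?_congr_mem tools _ (pvP2 nq) (fun t _ => by simp [pvP2, hq'])]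
        rfl
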